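-- pv_equiv track=rewrite | github.com/Nazzcodek/challenge | first.py | fourth_unlock
-- ===== SOURCE A (Python) =====
-- def fourth_unlock(range_start, range_end):
--     code = 0
--     for digit1 in range(range_start,range_end):
--         for digit2 in range(range_start,range_end):
--             for digit3 in range(range_start,range_end):
--                 if sum((digit1, digit2, digit3)) % 2 != 0:
--                     code += 1
--     return code
-- ===== SOURCE B (Python) =====
-- def fourth_unlock(range_start, range_end):
--     n = range_end - range_start
--     if n <= 0:
--         return 0
--     o = (n + range_start % 2) // 2  # count of odd numbers in the range
--     v = n - o                       # count of even numbers
--     return 3 * o * v * v + o * o * o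
-- ===== Notes on version B (the rewrite author's own statement) =====
-- stated objective: simpler
-- what changed: Replaces the triple nested loop with a closed-form parity count: with o odd and v even numbers in the range, the number of ordered triples with odd sum is 3*o*v*v + o*o*o.
import Mathlib
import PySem

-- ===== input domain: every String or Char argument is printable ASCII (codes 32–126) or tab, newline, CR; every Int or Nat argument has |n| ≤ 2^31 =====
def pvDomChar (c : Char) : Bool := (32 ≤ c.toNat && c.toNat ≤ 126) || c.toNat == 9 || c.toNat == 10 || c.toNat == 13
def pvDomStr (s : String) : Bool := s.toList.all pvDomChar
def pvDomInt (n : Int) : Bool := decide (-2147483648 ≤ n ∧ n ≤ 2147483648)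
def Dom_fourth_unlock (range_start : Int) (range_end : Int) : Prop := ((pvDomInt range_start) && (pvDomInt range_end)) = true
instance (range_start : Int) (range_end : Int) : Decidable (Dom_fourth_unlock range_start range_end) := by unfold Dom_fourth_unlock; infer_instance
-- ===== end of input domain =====

-- B replaces A's triple nested loop by a closed-form parity-count formula (simpler).

-- ===== PORT A =====
def fourth_unlock (range_start : Int) (range_end : Int) : Int :=
  (PySem.List.pyRange range_start range_end 1).foldl (fun code digit1 =>
    (PySem.List.pyRange range_start range_end 1).foldl (fun code digit2 =>
      (PySem.List.pyRange range_start range_end 1).foldl (fun code digit3 =>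
        if PySem.Int.mod (digit1 + digit2 + digit3) 2 ≠ 0 then code + 1 else code)
        code) code) 0

-- ===== PORT B =====
def fourth_unlock_alt (range_start : Int) (range_end : Int) : Int :=
  let n := range_end - range_start
  if n ≤ 0 then 0
  else
    let o := PySem.Int.floordiv (n + PySem.Int.mod range_start 2) 2
    let v := n - o
    3 * o * v * v + o * o * o

-- ===== PRECONDITION & SPEC =====
def Spec_fourth_unlock (range_start : Int) (range_end : Int) (out : Int) : Prop := out = fourth_unlock_alt range_start range_end
instance (range_start : Int) (range_end : Int) (out : Int) : Decidable (Spec_fourth_unlock range_start range_end out) := by unfold Spec_fourth_unlock; infer_instance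

-- ===== CLAIM (what is proved, stated in full; the proofs are below) =====
def Claim_equal_fourth_unlock : Prop := ∀ (range_start : Int) (range_end : Int), Dom_fourth_unlock range_start range_end → Spec_fourth_unlock range_start range_end (fourth_unlock range_start range_end)

-- ===== LEMMAS AND PROOFS =====

/-- Count of odd elements of a list (as an Int). -/
def oddI : List Int → Int
  | [] => 0
  | x :: t => (if x % 2 = 1 then 1 else 0) + oddI t

/-- Count of even elements of a list (as an Int). -/
def evenI : List Int → Int
  | [] => 0
  | x :: t => (if x % 2 = 0 then 1 else 0) + evenI t

theorem pymod2 (x : Int) : PySem.Int.mod x 2 = x % 2 :=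
  PySem.Int.mod_eq_emod_of_pos (by norm_num)

theorem evenI_add_oddI (L : List Int) : evenI L + oddI L = (L.length : Int) := by
  induction L with
  | nil => simp [evenI, oddI]
  | cons x t ih =>
    simp only [evenI, oddI, List.length_cons]
    rcases Int.emod_two_eq x with h | h <;> simp [h] <;> omega

theorem inner_fold (L : List Int) (k c : Int) :
    L.foldl (fun code d => if PySem.Int.mod (k + d) 2 ≠ 0 then code + 1 else code) c
      = c + (if k % 2 = 0 then oddI L else evenI L) := by
  induction L generalizing c with
  | nil =>
    simp only [List.foldl_nil, oddI, evenI]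
    split <;> omega
  | cons x t ih =>
    rw [List.foldl_cons, ih]
    simp only [oddI, evenI, pymod2]
    split_ifs <;> omega

theorem middle_fold (L M : List Int) (d1 c : Int) :
    M.foldl (fun code d2 =>
        L.foldl (fun code d3 =>
          if PySem.Int.mod (d1 + d2 + d3) 2 ≠ 0 then code + 1 else code) code) c
      = c + (if d1 % 2 = 0 then evenI M * oddI L + oddI M * evenI L
             else evenI M * evenI L + oddI M * oddI L) := by
  induction M generalizing c with
  | nil => simp [oddI, evenI]
  | cons x t ih =>
    rw [List.foldl_cons, inner_fold, ih]
    simp only [oddI, evenI]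
    split_ifs <;> first | (exfalso; omega) | ring

theorem outer_fold (L M N : List Int) (c : Int) :
    N.foldl (fun code d1 =>
        M.foldl (fun code d2 =>
          L.foldl (fun code d3 =>
            if PySem.Int.mod (d1 + d2 + d3) 2 ≠ 0 then code + 1 else code) code) code) c
      = c + (oddI N * (evenI M * evenI L + oddI M * oddI L)
             + evenI N * (evenI M * oddI L + oddI M * evenI L)) := by
  induction N generalizing c with
  | nil => simp [oddI, evenI]
  | cons x t ih =>
    rw [List.foldl_cons, middle_fold, ih]
    simp only [oddI, evenI]
    split_ifs <;> first | (exfalso; omega) | ring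

theorem oddI_pyRange (n : Nat) : ∀ s e : Int, e - s = n →
    oddI (PySem.List.pyRange s e 1) = (e - s + s % 2) / 2 := by
  induction n with
  | zero =>
    intro s e h
    rw [PySem.List.pyRange_one_eq_nil (by omega)]
    simp only [oddI]
    omega
  | succ k ih =>
    intro s e h
    rw [PySem.List.pyRange_one_cons (by omega)]
    simp only [oddI]
    rw [ih (s + 1) e (by omega)]
    split_ifs <;> omega

-- ===== VERDICT (by name: the statement is the Claim_ definition above) =====
theorem fourth_unlock_spec : Claim_equal_fourth_unlock := by
  intro s e _hdom
  unfold Spec_fourth_unlock fourth_unlock fourth_unlock_alt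
  by_cases h : e - s ≤ 0
  · rw [PySem.List.pyRange_one_eq_nil (by omega)]
    simp [h]
  · simp only [if_neg h]
    rw [outer_fold]
    have ho : oddI (PySem.List.pyRange s e 1) = (e - s + s % 2) / 2 :=
      oddI_pyRange (e - s).toNat s e (by omega)
    have hlen := evenI_add_oddI (PySem.List.pyRange s e 1)
    rw [PySem.List.length_pyRange_one] at hlen
    have hlen' : evenI (PySem.List.pyRange s e 1) + oddI (PySem.List.pyRange s e 1) = e - s := by
      omega
    have he : evenI (PySem.List.pyRange s e 1) = (e - s) - (e - s + s % 2) / 2 := by omega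
    rw [PySem.Int.floordiv_eq_ediv_of_pos (by norm_num), pymod2, ho, he]
    ring
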